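-- pv_equiv track=rewrite | github.com/sydney0zq/LeetCode | interviews/pdd/2.py | list_all_poss
-- ===== SOURCE A (Python) =====
-- def hor_all_poss(l):
--     a, b, c, d, e, f = l
--     ret = [l]
--     ret.append([a, b, d, c, f, e])
--     ret.append([a, b, e, f, d, c])
--     ret.append([a, b, f, e, c, d])
--     return ret
--
-- def list_all_poss(l):
--     a, b, c, d, e, f = l
--     ret = [l]
--     ret.append([b, a, c, d, f, e])
--     ret.append([c, d, a, b, f, e])
--     ret.append([d, c, a, b, e, f])
--     ret.append([e, f, a, b, c, d])
--     ret.append([f, e, a, b, d, c])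
--     all_poss = ret
--
--     ext_ret = []
--     for i_poss in all_poss:
--         ext_poss = hor_all_poss(i_poss)
--         ext_ret.extend(ext_poss)
--     return ext_ret
-- ===== SOURCE B (Python) =====
-- # 24 cube orientations as index permutations (outer-then-inner order of A).
-- _TABLE = [
--     (0, 1, 2, 3, 4, 5), (0, 1, 3, 2, 5, 4), (0, 1, 4, 5, 3, 2), (0, 1, 5, 4, 2, 3),
--     (1, 0, 2, 3, 5, 4), (1, 0, 3, 2, 4, 5), (1, 0, 5, 4, 3, 2), (1, 0, 4, 5, 2, 3),
--     (2, 3, 0, 1, 5, 4), (2, 3, 1, 0, 4, 5), (2, 3, 5, 4, 1, 0), (2, 3, 4, 5, 0, 1),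
--     (3, 2, 0, 1, 4, 5), (3, 2, 1, 0, 5, 4), (3, 2, 4, 5, 1, 0), (3, 2, 5, 4, 0, 1),
--     (4, 5, 0, 1, 2, 3), (4, 5, 1, 0, 3, 2), (4, 5, 2, 3, 1, 0), (4, 5, 3, 2, 0, 1),
--     (5, 4, 0, 1, 3, 2), (5, 4, 1, 0, 2, 3), (5, 4, 3, 2, 1, 0), (5, 4, 2, 3, 0, 1),
-- ]
--
-- def list_all_poss(l):
--     a, b, c, d, e, f = l  # length check, raises like A on non-6-element input
--     return [[l[i] for i in perm] for perm in _TABLE]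
-- ===== Notes on version B (the rewrite author's own statement) =====
-- stated objective: simpler
-- what changed: Replaced the helper function and nested extend loop with a precomputed constant table of the 24 index permutations and a single flat comprehension indexing the input.
import Mathlib
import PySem

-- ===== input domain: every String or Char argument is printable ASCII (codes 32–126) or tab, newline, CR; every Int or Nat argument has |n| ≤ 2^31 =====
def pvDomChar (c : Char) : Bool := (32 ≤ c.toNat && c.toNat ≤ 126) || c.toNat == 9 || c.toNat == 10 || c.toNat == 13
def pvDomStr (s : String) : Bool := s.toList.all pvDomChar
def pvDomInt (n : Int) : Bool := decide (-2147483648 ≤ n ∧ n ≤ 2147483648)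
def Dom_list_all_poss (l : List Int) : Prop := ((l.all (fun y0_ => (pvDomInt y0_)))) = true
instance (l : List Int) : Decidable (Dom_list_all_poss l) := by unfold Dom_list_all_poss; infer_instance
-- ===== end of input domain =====

-- B replaces A's helper + nested loop with one precomputed table of 24 index
-- permutations and a flat map (objective: simpler; return-value equivalence only —
-- A's first output list aliases the input, B always builds fresh lists).

-- ===== PORT A =====
def hor_all_poss (l : List Int) : List (List Int) :=
  match l with
  | [a, b, c, d, e, f] =>
      [l, [a, b, d, c, f, e], [a, b, e, f, d, c], [a, b, f, e, c, d]]
  | _ => []  -- Python raises ValueError here; excluded by Pre_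

def list_all_poss (l : List Int) : List (List Int) :=
  match l with
  | [a, b, c, d, e, f] =>
      let all_poss := [l, [b, a, c, d, f, e], [c, d, a, b, f, e],
        [d, c, a, b, e, f], [e, f, a, b, c, d], [f, e, a, b, d, c]]
      all_poss.foldl (fun ext_ret i_poss => ext_ret ++ hor_all_poss i_poss) []
  | _ => []  -- Python raises ValueError here; excluded by Pre_

-- ===== PORT B =====
def pvTable_list_all_poss : List (List Nat) :=
  [[0, 1, 2, 3, 4, 5], [0, 1, 3, 2, 5, 4], [0, 1, 4, 5, 3, 2], [0, 1, 5, 4, 2, 3],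
   [1, 0, 2, 3, 5, 4], [1, 0, 3, 2, 4, 5], [1, 0, 5, 4, 3, 2], [1, 0, 4, 5, 2, 3],
   [2, 3, 0, 1, 5, 4], [2, 3, 1, 0, 4, 5], [2, 3, 5, 4, 1, 0], [2, 3, 4, 5, 0, 1],
   [3, 2, 0, 1, 4, 5], [3, 2, 1, 0, 5, 4], [3, 2, 4, 5, 1, 0], [3, 2, 5, 4, 0, 1],
   [4, 5, 0, 1, 2, 3], [4, 5, 1, 0, 3, 2], [4, 5, 2, 3, 1, 0], [4, 5, 3, 2, 0, 1],
   [5, 4, 0, 1, 3, 2], [5, 4, 1, 0, 2, 3], [5, 4, 3, 2, 1, 0], [5, 4, 2, 3, 0, 1]]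

def list_all_poss_alt (l : List Int) : List (List Int) :=
  if l.length = 6 then  -- the unpack 'a,b,c,d,e,f = l' as a length check
    pvTable_list_all_poss.map (fun perm => perm.map (fun i => l.getD i 0))
  else []  -- Python raises ValueError here; excluded by Pre_

-- ===== PRECONDITION & SPEC =====
-- A's unpacking raises ValueError unless the list has exactly 6 elements.
def Pre_list_all_poss (l : List Int) : Prop := l.length = 6
instance (l : List Int) : Decidable (Pre_list_all_poss l) := by unfold Pre_list_all_poss; infer_instance
def pvWitness_list_all_poss : List Int := [1, 2, 3, 4, 5, 6]

def Spec_list_all_poss (l : List Int) (out : List (List Int)) : Prop := out = list_all_poss_alt l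
instance (l : List Int) (out : List (List Int)) : Decidable (Spec_list_all_poss l out) := by unfold Spec_list_all_poss; infer_instance

-- ===== CLAIM (what is proved, stated in full; the proofs are below) =====
def Claim_equal_list_all_poss : Prop := ∀ (l : List Int), Dom_list_all_poss l → Pre_list_all_poss l → Spec_list_all_poss l (list_all_poss l)

-- ===== LEMMAS AND PROOFS =====

-- ===== VERDICT (by name: the statement is the Claim_ definition above) =====
theorem list_all_poss_spec : Claim_equal_list_all_poss := by
  intro l _ hpre
  unfold Pre_list_all_poss at hpre
  match l, hpre with
  | [a, b, c, d, e, f], _ => rfl
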